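-- pv_equiv track=rewrite | github.com/DevMyong/algorithm | internal/python-for-coding-test/implementation/상하좌우.py | solution
-- ===== SOURCE A (Python) =====
-- def solution(n, moves):
--     now_y, now_x = 1, 1
--     m = {'R': (0, 1), 'L': (0, -1), 'U': (-1, 0), 'D': (1, 0)}
--
--     for move in moves:
--         dy, dx = m[move][0], m[move][1]
--         if not (0 < now_y + dy < n) or not (0 < now_x + dx < n):
--             continue
--         now_y += dy
--         now_x += dx
--     return now_y, now_x
-- ===== SOURCE B (Python) =====
-- def solution(n, moves):
--     m = {'R': (0, 1), 'L': (0, -1), 'U': (-1, 0), 'D': (1, 0)}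
--     # horizontal axis: only the dx component matters; the y-coordinate of the
--     # current position never blocks a horizontal move (see header of the proof)
--     x = 1
--     for move in moves:
--         dx = m[move][1]
--         if 0 < x + dx < n:
--             x += dx
--     # vertical axis, independently
--     y = 1
--     for move in moves:
--         dy = m[move][0]
--         if 0 < y + dy < n:
--             y += dy
--     return y, x
-- ===== Notes on version B (the rewrite author's own statement) =====
-- stated objective: alternative
-- what changed: Instead of one loop over a (y,x) pair with a combined two-axis bound check, B computes the final x and the final y in two independent per-axis passes, using the fact that the non-moving axis never fails its bound check; the dict lookup is kept so unknown moves still raise KeyError.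
import Mathlib
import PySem

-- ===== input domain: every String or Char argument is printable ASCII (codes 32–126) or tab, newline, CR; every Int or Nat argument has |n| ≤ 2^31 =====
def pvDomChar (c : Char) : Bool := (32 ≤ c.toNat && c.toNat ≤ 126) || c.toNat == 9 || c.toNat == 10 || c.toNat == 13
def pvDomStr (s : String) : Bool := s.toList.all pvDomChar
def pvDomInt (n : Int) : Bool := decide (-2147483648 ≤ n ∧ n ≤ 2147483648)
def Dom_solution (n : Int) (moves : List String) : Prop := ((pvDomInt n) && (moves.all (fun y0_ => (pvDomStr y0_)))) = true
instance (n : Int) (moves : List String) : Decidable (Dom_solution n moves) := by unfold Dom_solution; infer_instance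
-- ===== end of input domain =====

-- B recomputes the answer in two independent per-axis passes (x from L/R deltas, y
-- from U/D deltas) instead of A's single pass over a (y,x) pair; same cost, plainer
-- per-axis reasoning. Equivalence proved for move lists over {R,L,U,D} (Pre_).

-- ===== PORT A =====
-- the dict m = {'R': (0, 1), 'L': (0, -1), 'U': (-1, 0), 'D': (1, 0)}
def mTbl : PySem.Dict String (Int × Int) :=
  PySem.Dict.ofList [("R", ((0 : Int), (1 : Int))), ("L", (0, -1)), ("U", (-1, 0)), ("D", (1, 0))]

-- one iteration of A's loop body; m[move] with an unknown key is a KeyError in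
-- Python (get? = none), excluded by Pre_solution — the port keeps the state there
def stepA (n : Int) (st : Int × Int) (move : String) : Int × Int :=
  match mTbl.get? move with
  | none => st
  | some d =>
    if ¬(0 < st.1 + d.1 ∧ st.1 + d.1 < n) ∨ ¬(0 < st.2 + d.2 ∧ st.2 + d.2 < n) then st
    else (st.1 + d.1, st.2 + d.2)

def solution (n : Int) (moves : List String) : Int × Int :=
  moves.foldl (stepA n) (1, 1)

-- ===== PORT B =====
def stepX (n : Int) (x : Int) (move : String) : Int :=
  match mTbl.get? move with
  | none => x
  | some d => if 0 < x + d.2 ∧ x + d.2 < n then x + d.2 else x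

def stepY (n : Int) (y : Int) (move : String) : Int :=
  match mTbl.get? move with
  | none => y
  | some d => if 0 < y + d.1 ∧ y + d.1 < n then y + d.1 else y

def solution_alt (n : Int) (moves : List String) : Int × Int :=
  (moves.foldl (stepY n) 1, moves.foldl (stepX n) 1)

-- ===== PRECONDITION & SPEC =====
-- Pre_ excludes move strings outside {R,L,U,D}, on which A's m[move] raises KeyError
def Pre_solution (n : Int) (moves : List String) : Prop :=
  ∀ mv ∈ moves, mv = "R" ∨ mv = "L" ∨ mv = "U" ∨ mv = "D"
instance (n : Int) (moves : List String) : Decidable (Pre_solution n moves) := by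
  unfold Pre_solution; infer_instance

def pvWitness_solution : Int × List String := (5, ["R", "R", "U", "D", "L"])

def Spec_solution (n : Int) (moves : List String) (out : Int × Int) : Prop := out = solution_alt n moves
instance (n : Int) (moves : List String) (out : Int × Int) : Decidable (Spec_solution n moves out) := by unfold Spec_solution; infer_instance

-- ===== CLAIM (what is proved, stated in full; the proofs are below) =====
def Claim_equal_solution : Prop := ∀ (n : Int) (moves : List String), Dom_solution n moves → Pre_solution n moves → Spec_solution n moves (solution n moves)

-- ===== LEMMAS AND PROOFS =====

lemma get_R : mTbl.get? "R" = some (0, 1) := by decide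
lemma get_L : mTbl.get? "L" = some (0, -1) := by decide
lemma get_U : mTbl.get? "U" = some (-1, 0) := by decide
lemma get_D : mTbl.get? "D" = some (1, 0) := by decide

-- one step of A equals the pair of per-axis steps, and the joint invariant
-- (n too small for any move to succeed, or both coordinates strictly inside (0,n))
-- is preserved
lemma step_eq (n y x : Int) (mv : String)
    (hmv : mv = "R" ∨ mv = "L" ∨ mv = "U" ∨ mv = "D")
    (hinv : n < 2 ∨ (0 < y ∧ y < n ∧ 0 < x ∧ x < n)) :
    stepA n (y, x) mv = (stepY n y mv, stepX n x mv) ∧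
      (n < 2 ∨ (0 < stepY n y mv ∧ stepY n y mv < n ∧
                0 < stepX n x mv ∧ stepX n x mv < n)) := by
  rcases hmv with h | h | h | h <;> subst h <;>
    simp only [stepA, stepY, stepX, get_R, get_L, get_U, get_D] <;>
    rcases hinv with hn | ⟨h1, h2, h3, h4⟩ <;>
    constructor <;> split_ifs <;> simp_all <;> omega

lemma fold_eq (n : Int) (moves : List String) (y x : Int)
    (hp : ∀ mv ∈ moves, mv = "R" ∨ mv = "L" ∨ mv = "U" ∨ mv = "D")
    (hinv : n < 2 ∨ (0 < y ∧ y < n ∧ 0 < x ∧ x < n)) :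
    moves.foldl (stepA n) (y, x) = (moves.foldl (stepY n) y, moves.foldl (stepX n) x) := by
  induction moves generalizing y x with
  | nil => rfl
  | cons mv rest ih =>
    obtain ⟨hstep, hinv'⟩ := step_eq n y x mv (hp mv (List.mem_cons_self)) hinv
    simp only [List.foldl_cons, hstep]
    exact ih _ _ (fun m hm => hp m (List.mem_cons_of_mem _ hm)) hinv'

-- ===== VERDICT (by name: the statement is the Claim_ definition above) =====
theorem solution_spec : Claim_equal_solution := by
  intro n moves _ hpre
  unfold Spec_solution solution solution_alt
  by_cases hn : n < 2
  · exact fold_eq n moves 1 1 hpre (Or.inl hn)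
  · exact fold_eq n moves 1 1 hpre (Or.inr ⟨by omega, by omega, by omega, by omega⟩)
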